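-- pv_equiv track=rewrite | github.com/Chronic700/N_Gram-Text-Generator | N_gram.py | unique_counts
-- ===== SOURCE A (Python) =====
-- from collections import defaultdict, Counter
--
-- def unique_counts(n_grams):
--     uc=defaultdict(set)
--     for n_gram in n_grams:
--         context=n_gram[:-1]
--         word=n_gram[-1]
--         uc[context].add(word)
--     follow_counts=defaultdict(int)
--     for context, words in uc.items():
--         follow_counts[context]=len(words)
--     return follow_counts
-- ===== SOURCE B (Python) =====
-- from collections import defaultdict
--
-- def unique_counts(n_grams):
--     seen = set()
--     follow_counts = defaultdict(int)
--     for n_gram in n_grams: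
--         pair = (n_gram[:-1], n_gram[-1])
--         if pair not in seen:
--             seen.add(pair)
--             follow_counts[pair[0]] += 1
--     return follow_counts
-- ===== Notes on version B (the rewrite author's own statement) =====
-- stated objective: alternative
-- what changed: Replaced A's two-phase dict-of-sets-then-measure-lengths decomposition with a single pass that keeps one flat set of (context, word) pairs and increments a count dict at each first-seen pair.
import Mathlib
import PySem

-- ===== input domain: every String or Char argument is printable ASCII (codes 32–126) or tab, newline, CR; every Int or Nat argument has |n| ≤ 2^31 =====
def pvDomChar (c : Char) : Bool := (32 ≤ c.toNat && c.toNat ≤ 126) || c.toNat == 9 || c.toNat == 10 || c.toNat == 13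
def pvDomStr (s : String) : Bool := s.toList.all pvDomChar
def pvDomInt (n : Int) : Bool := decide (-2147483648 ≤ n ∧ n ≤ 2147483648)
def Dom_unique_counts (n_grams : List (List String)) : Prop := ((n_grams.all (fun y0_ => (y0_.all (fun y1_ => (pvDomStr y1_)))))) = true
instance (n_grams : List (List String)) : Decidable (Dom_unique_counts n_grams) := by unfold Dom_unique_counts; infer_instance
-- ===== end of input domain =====

-- B replaces A's dict-of-sets-then-length two-phase decomposition by a single pass keeping a flat
-- (context, word) pair set and an incrementally maintained count dict (objective: alternative).

-- ===== PORT A =====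
-- loop body of A's first 'for' as a named helper (literal: context = n_gram[:-1]; word = n_gram[-1]; uc[context].add(word))
def ucStepA (uc : PySem.Dict (List String) (PySem.Set String)) (n_gram : List String) :
    PySem.Dict (List String) (PySem.Set String) :=
  let context := PySem.List.slice n_gram none (some (-1))
  let word := PySem.List.pyGetD n_gram (-1) ""   -- n_gram[-1]; total form, inputs with [] excluded by Pre_
  uc.insert context (PySem.Set.add (uc.getD context PySem.Set.empty) word)

def unique_counts (n_grams : List (List String)) : List (List String × Int) :=
  let uc := n_grams.foldl ucStepA PySem.Dict.empty
  let follow_counts :=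
    uc.items.foldl (fun fc p => fc.insert p.1 (PySem.Set.len p.2)) (PySem.Dict.empty : PySem.Dict (List String) Int)
  follow_counts.items

-- ===== PORT B =====
-- loop body of B's single 'for': membership test in the flat pair set, then incremental count
def ucStepB (st : PySem.Set (List String × String) × PySem.Dict (List String) Int) (n_gram : List String) :
    PySem.Set (List String × String) × PySem.Dict (List String) Int :=
  let pair := (PySem.List.slice n_gram none (some (-1)), PySem.List.pyGetD n_gram (-1) "")
  if pair ∈ st.1 then st
  else (PySem.Set.add st.1 pair, st.2.insert pair.1 (st.2.getD pair.1 0 + 1))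

def unique_counts_alt (n_grams : List (List String)) : List (List String × Int) :=
  (n_grams.foldl ucStepB ((PySem.Set.empty : PySem.Set (List String × String)), (PySem.Dict.empty : PySem.Dict (List String) Int))).2.items

-- ===== PRECONDITION & SPEC =====
-- Pre_ excludes exactly the inputs containing an empty n-gram, on which Python's n_gram[-1] raises IndexError.
def Pre_unique_counts (n_grams : List (List String)) : Prop := ∀ g ∈ n_grams, g ≠ []
instance (n_grams : List (List String)) : Decidable (Pre_unique_counts n_grams) := by unfold Pre_unique_counts; infer_instance
def pvWitness_unique_counts : List (List String) := [["a", "b"], ["a", "c"], ["a", "b"], ["b", "c"]]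

def Spec_unique_counts (n_grams : List (List String)) (out : List (List String × Int)) : Prop := out = unique_counts_alt n_grams
instance (n_grams : List (List String)) (out : List (List String × Int)) : Decidable (Spec_unique_counts n_grams out) := by unfold Spec_unique_counts; infer_instance

-- ===== CLAIM (what is proved, stated in full; the proofs are below) =====
def Claim_equal_unique_counts : Prop := ∀ (n_grams : List (List String)), Dom_unique_counts n_grams → Pre_unique_counts n_grams → Spec_unique_counts n_grams (unique_counts n_grams)

-- ===== LEMMAS AND PROOFS =====

-- The loop invariant tying A's dict-of-sets to B's (pair set, count dict) state.
def pvInv (uc : PySem.Dict (List String) (PySem.Set String))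
    (seen : PySem.Set (List String × String)) (fc : PySem.Dict (List String) Int) : Prop :=
  uc.keys.Nodup ∧
  fc.items = uc.items.map (fun p => (p.1, PySem.Set.len p.2)) ∧
  ∀ c w, ((c, w) ∈ seen ↔ ∃ s, uc.get? c = some s ∧ w ∈ s)

lemma pvKeys_eq {uc : PySem.Dict (List String) (PySem.Set String)} {fc : PySem.Dict (List String) Int}
    (h : fc.items = uc.items.map (fun p => (p.1, PySem.Set.len p.2))) : fc.keys = uc.keys := by
  simp [PySem.Dict.keys, h, List.map_map, Function.comp]

lemma pvStep (uc : PySem.Dict (List String) (PySem.Set String))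
    (seen : PySem.Set (List String × String)) (fc : PySem.Dict (List String) Int)
    (c : List String) (w : String) (h : pvInv uc seen fc) :
    pvInv (uc.insert c (PySem.Set.add (uc.getD c PySem.Set.empty) w))
      (if (c, w) ∈ seen then seen else PySem.Set.add seen (c, w))
      (if (c, w) ∈ seen then fc else fc.insert c (fc.getD c 0 + 1)) := by
  obtain ⟨hnd, hitems, hseen⟩ := h
  have hfk : fc.keys = uc.keys := pvKeys_eq hitems
  by_cases hmem : (c, w) ∈ seen
  · -- pair already seen: both states are unchanged (A re-inserts the same set at the same key)
    simp only [if_pos hmem]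
    obtain ⟨s, hget, hws⟩ := (hseen c w).mp hmem
    have hgd : uc.getD c PySem.Set.empty = s := PySem.Dict.getD_of_get?_eq_some uc _ hget
    have hins : uc.insert c s = uc := by
      apply PySem.Dict.ext
      rw [PySem.Dict.items_insert_of_contains uc s
        (by rw [PySem.Dict.contains_eq_isSome_get?, hget]; rfl)]
      have hpt : ∀ p ∈ uc.items, (if (p.1 == c) = true then (c, s) else p) = p := by
        intro p hp
        split_ifs with hpc
        · have hpc' : p.1 = c := by simpa using hpc
          have := PySem.Dict.get?_of_mem_items uc hp hnd
          rw [hpc', hget] at this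
          obtain rfl : s = p.2 := by injection this
          rw [← hpc']
        · rfl
      rw [List.map_congr_left hpt, List.map_id']
    rw [hgd, PySem.Set.add_of_mem hws, hins]
    exact ⟨hnd, hitems, hseen⟩
  · simp only [if_neg hmem]
    have hadds : PySem.Set.add seen (c, w) = seen ++ [(c, w)] := PySem.Set.add_of_not_mem hmem
    refine ⟨PySem.Dict.nodup_keys_insert uc c _ hnd, ?_, ?_⟩
    · -- count component
      cases hget : uc.get? c with
      | some s =>
        have hws : w ∉ s := fun hw => hmem ((hseen c w).mpr ⟨s, hget, hw⟩)
        have hgd : uc.getD c PySem.Set.empty = s := PySem.Dict.getD_of_get?_eq_some uc _ hget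
        have hcs : (c, s) ∈ uc.items := (PySem.Dict.get?_eq_some_iff_mem_items uc c s hnd).mp hget
        have hck : c ∈ uc.keys := PySem.Dict.mem_keys_of_mem_items uc hcs
        have hfnd : fc.keys.Nodup := hfk ▸ hnd
        have hfcs : (c, PySem.Set.len s) ∈ fc.items := by
          rw [hitems]; exact List.mem_map_of_mem hcs
        have hgdfc : fc.getD c 0 = PySem.Set.len s := PySem.Dict.getD_of_mem_items fc hfcs hfnd 0
        have hcfc : fc.contains c = true := (PySem.Dict.contains_iff_mem_keys fc c).mpr (hfk ▸ hck)
        have hcuc : uc.contains c = true := (PySem.Dict.contains_iff_mem_keys uc c).mpr hck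
        rw [hgd, PySem.Set.add_of_not_mem hws, PySem.Dict.items_insert_of_contains fc _ hcfc,
          PySem.Dict.items_insert_of_contains uc _ hcuc, hitems, List.map_map, List.map_map]
        apply List.map_congr_left
        intro p hp
        by_cases hpc : p.1 = c
        · have hps := PySem.Dict.get?_of_mem_items uc hp hnd
          rw [hpc, hget] at hps
          obtain rfl : s = p.2 := by injection hps
          simp [Function.comp, hpc, hgdfc, PySem.Set.len]
        · simp [Function.comp, hpc]
      | none =>
        have hnotk : c ∉ uc.keys := (PySem.Dict.get?_eq_none_iff_not_mem_keys uc c).mp hget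
        have hcuc : uc.contains c = false := by
          rw [← Bool.not_eq_true, PySem.Dict.contains_iff_mem_keys]; exact hnotk
        have hcfc : fc.contains c = false := by
          rw [← Bool.not_eq_true, PySem.Dict.contains_iff_mem_keys, hfk]; exact hnotk
        have hgd : uc.getD c PySem.Set.empty = PySem.Set.empty :=
          PySem.Dict.getD_of_not_contains uc _ hcuc
        have hgdfc : fc.getD c 0 = 0 := PySem.Dict.getD_of_not_contains fc 0 hcfc
        rw [hgd, PySem.Dict.items_insert_of_not_contains fc _ hcfc,
          PySem.Dict.items_insert_of_not_contains uc _ hcuc, hitems, List.map_append, hgdfc]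
        rfl
    · -- seen component
      intro c' w'
      rw [hadds]
      cases hget : uc.get? c with
      | some s =>
        have hws : w ∉ s := fun hw => hmem ((hseen c w).mpr ⟨s, hget, hw⟩)
        have hgd : uc.getD c PySem.Set.empty = s := PySem.Dict.getD_of_get?_eq_some uc _ hget
        rw [hgd, PySem.Set.add_of_not_mem hws]
        constructor
        · intro hm
          rcases List.mem_append.mp hm with hm | hm
          · obtain ⟨s', hg', hw'⟩ := (hseen c' w').mp hm
            by_cases hc : c' = c
            · subst hc
              rw [hget] at hg'
              obtain rfl : s = s' := by injection hg'
              exact ⟨s ++ [w], by rw [PySem.Dict.get?_insert_self], List.mem_append_left _ hw'⟩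
            · exact ⟨s', by rw [PySem.Dict.get?_insert_of_ne uc _ hc]; exact hg', hw'⟩
          · have hp : (c', w') = (c, w) := List.mem_singleton.mp hm
            obtain ⟨rfl, rfl⟩ := Prod.mk.injEq c' w' c w ▸ hp
            exact ⟨s ++ [w'], by rw [PySem.Dict.get?_insert_self], List.mem_append_right _ (List.mem_singleton.mpr rfl)⟩
        · intro hex
          obtain ⟨s', hg', hw'⟩ := hex
          by_cases hc : c' = c
          · subst hc
            rw [PySem.Dict.get?_insert_self] at hg'
            obtain rfl : s ++ [w] = s' := by injection hg'
            rcases List.mem_append.mp hw' with hw2 | hw2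
            · exact List.mem_append_left _ ((hseen c' w').mpr ⟨s, hget, hw2⟩)
            · obtain rfl : w' = w := List.mem_singleton.mp hw2
              exact List.mem_append_right _ (List.mem_singleton.mpr rfl)
          · rw [PySem.Dict.get?_insert_of_ne uc _ hc] at hg'
            exact List.mem_append_left _ ((hseen c' w').mpr ⟨s', hg', hw'⟩)
      | none =>
        have hgd : uc.getD c PySem.Set.empty = PySem.Set.empty := by
          apply PySem.Dict.getD_of_not_contains
          rw [PySem.Dict.contains_eq_isSome_get?, hget]; rfl
        have haddw : PySem.Set.add PySem.Set.empty w = [w] := rfl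
        rw [hgd, haddw]
        constructor
        · intro hm
          rcases List.mem_append.mp hm with hm | hm
          · obtain ⟨s', hg', hw'⟩ := (hseen c' w').mp hm
            by_cases hc : c' = c
            · subst hc; rw [hget] at hg'; cases hg'
            · exact ⟨s', by rw [PySem.Dict.get?_insert_of_ne uc _ hc]; exact hg', hw'⟩
          · have hp : (c', w') = (c, w) := List.mem_singleton.mp hm
            obtain ⟨rfl, rfl⟩ := Prod.mk.injEq c' w' c w ▸ hp
            exact ⟨[w'], by rw [PySem.Dict.get?_insert_self], List.mem_singleton.mpr rfl⟩
        · intro hex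
          obtain ⟨s', hg', hw'⟩ := hex
          by_cases hc : c' = c
          · subst hc
            rw [PySem.Dict.get?_insert_self] at hg'
            obtain rfl : [w] = s' := by injection hg'
            obtain rfl : w' = w := List.mem_singleton.mp hw'
            exact List.mem_append_right _ (List.mem_singleton.mpr rfl)
          · rw [PySem.Dict.get?_insert_of_ne uc _ hc] at hg'
            exact List.mem_append_left _ ((hseen c' w').mpr ⟨s', hg', hw'⟩)

lemma pvFold (gs : List (List String)) (uc : PySem.Dict (List String) (PySem.Set String))
    (seen : PySem.Set (List String × String)) (fc : PySem.Dict (List String) Int)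
    (h : pvInv uc seen fc) :
    pvInv (gs.foldl ucStepA uc) (gs.foldl ucStepB (seen, fc)).1 (gs.foldl ucStepB (seen, fc)).2 := by
  induction gs generalizing uc seen fc with
  | nil => exact h
  | cons g gs ih =>
    simp only [List.foldl_cons]
    have hstep := pvStep uc seen fc (PySem.List.slice g none (some (-1))) (PySem.List.pyGetD g (-1) "") h
    have hB : ucStepB (seen, fc) g =
        ((if (PySem.List.slice g none (some (-1)), PySem.List.pyGetD g (-1) "") ∈ seen then seen
          else PySem.Set.add seen (PySem.List.slice g none (some (-1)), PySem.List.pyGetD g (-1) "")),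
         (if (PySem.List.slice g none (some (-1)), PySem.List.pyGetD g (-1) "") ∈ seen then fc
          else fc.insert (PySem.List.slice g none (some (-1))) (fc.getD (PySem.List.slice g none (some (-1))) 0 + 1))) := by
      unfold ucStepB; split <;> simp_all
    rw [hB]
    exact ih _ _ _ hstep

theorem unique_counts_spec : Claim_equal_unique_counts := by
  intro n_grams _ _
  unfold Spec_unique_counts unique_counts unique_counts_alt
  have h := pvFold n_grams PySem.Dict.empty PySem.Set.empty PySem.Dict.empty
    (by refine ⟨by simp [PySem.Dict.keys_empty], rfl, ?_⟩
        intro c w; simp [PySem.Set.empty, PySem.Dict.get?_empty])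
  obtain ⟨hnd, hitems, _⟩ := h
  rw [PySem.Dict.items_foldl_insert_fresh _ Prod.fst (fun p => PySem.Set.len p.2) _
      (fun a _ => PySem.Dict.contains_empty (ν := Int) a.1)
      (by simpa [PySem.Dict.keys] using hnd)]
  rw [hitems]; rfl
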